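-- pv_equiv track=rewrite | github.com/cdjasonj/CCF_IE | data_process/data_process.py | _find_obj4
-- ===== SOURCE A (Python) =====
-- def _find_obj4(keys,text):
--     #返回最大长度的出品公司，保证截取的完整性
--     maxlen = 0
--     obj = ''
--     for key in keys:
--         if key in text:
--             if len(key)>maxlen:
--                 maxlen = len(key)
--                 obj = key
--     return obj
-- ===== SOURCE B (Python) =====
-- def _find_obj4(keys, text):
--     # Sort keys by length descending (stable), then return the first one
--     # contained in text: that is the longest matching key, ties broken by
--     # original order exactly as A's strict running-max does.
--     for key in sorted(keys, key=len, reverse=True):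
--         if key in text:
--             return key
--     return ''
-- ===== Notes on version B (the rewrite author's own statement) =====
-- stated objective: alternative
-- what changed: A keeps a running (maxlen, obj) accumulator and substring-tests every key; B stable-sorts the keys by length descending and returns the first key found in text, so the selection logic disappears into the sort order and the scan stops at the first hit.
import Mathlib
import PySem

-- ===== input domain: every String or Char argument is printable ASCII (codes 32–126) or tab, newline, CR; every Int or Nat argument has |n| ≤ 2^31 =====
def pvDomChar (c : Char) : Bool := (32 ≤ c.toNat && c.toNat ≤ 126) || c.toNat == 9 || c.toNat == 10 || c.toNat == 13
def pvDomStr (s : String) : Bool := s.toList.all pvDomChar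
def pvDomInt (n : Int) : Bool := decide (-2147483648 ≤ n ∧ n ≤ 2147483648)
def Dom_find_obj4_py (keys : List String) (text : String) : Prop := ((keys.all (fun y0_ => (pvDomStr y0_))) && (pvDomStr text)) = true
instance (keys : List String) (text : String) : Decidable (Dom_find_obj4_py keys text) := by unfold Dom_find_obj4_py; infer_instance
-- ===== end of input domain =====

-- B replaces A's running-max accumulator by stable-sorting the keys by length
-- descending and returning the first key contained in text; proved equal.

-- ===== PORT A =====
-- A: running (maxlen, obj) state, updated when key is in text and strictly longer.
def find_obj4_py (keys : List String) (text : String) : String :=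
  (keys.foldl
    (fun (st : Int × String) key =>
      if PySem.Str.isIn key text then
        if st.1 < PySem.Str.len key then (PySem.Str.len key, key) else st
      else st)
    ((0 : Int), "")).2

-- ===== PORT B =====
-- B's loop with early return: first key of the list contained in text, else ''.
def pvFirstIn (l : List String) (text : String) : String :=
  match l with
  | [] => ""
  | k :: rest => if PySem.Str.isIn k text then k else pvFirstIn rest text

-- B: for key in sorted(keys, key=len, reverse=True): if key in text: return key; return ''
def find_obj4_py_alt (keys : List String) (text : String) : String :=
  pvFirstIn (PySem.List.sorted keys PySem.Str.len true) text

-- ===== PRECONDITION & SPEC =====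
def Spec_find_obj4_py (keys : List String) (text : String) (out : String) : Prop := out = find_obj4_py_alt keys text
instance (keys : List String) (text : String) (out : String) : Decidable (Spec_find_obj4_py keys text out) := by unfold Spec_find_obj4_py; infer_instance

-- ===== CLAIM (what is proved, stated in full; the proofs are below) =====
def Claim_equal_find_obj4_py : Prop := ∀ (keys : List String) (text : String), Dom_find_obj4_py keys text → Spec_find_obj4_py keys text (find_obj4_py keys text)

-- ===== LEMMAS AND PROOFS =====

-- abbreviation used only in the proofs below
def pvBf (f : String → Int) : String → String → Bool := fun a b => decide (f b < f a)

-- a string of PySem length 0 is the empty string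
theorem len_zero_eq_empty (s : String) (h : PySem.Str.len s = 0) : s = "" := by
  simp only [PySem.Str.len] at h
  have hl : s.toList = [] := List.length_eq_zero_iff.mp (by exact_mod_cast h)
  rw [← String.toList_inj, hl]; rfl

-- pvFirstIn is find? + default ''
theorem pvFirstIn_eq_find? (l : List String) (text : String) :
    pvFirstIn l text = (l.find? (fun k => PySem.Str.isIn k text)).getD "" := by
  induction l with
  | nil => rfl
  | cons k rest ih =>
    cases hk : PySem.Chars.isIn k.toList text.toList
    · simp [pvFirstIn, List.find?, hk, ih]
    · simp [pvFirstIn, List.find?, hk]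

-- inserting into an f-descending list keeps it f-descending
theorem pairwise_insertBy (f : String → Int) (x : String) (s : List String)
    (h : s.Pairwise (fun a b => f b ≤ f a)) :
    (PySem.List.insertBy (pvBf f) x s).Pairwise (fun a b => f b ≤ f a) := by
  induction s with
  | nil => simp [PySem.List.insertBy]
  | cons y ys ih =>
    rcases List.pairwise_cons.mp h with ⟨hy, hys⟩
    by_cases hxy : f y < f x
    · have : pvBf f x y = true := by simp [pvBf, hxy]
      simp only [PySem.List.insertBy, this, if_pos]
      refine List.pairwise_cons.mpr ⟨?_, h⟩
      intro z hz
      rcases List.mem_cons.mp hz with rfl | hz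
      · omega
      · have := hy z hz; omega
    · have : pvBf f x y = false := by simp [pvBf]; omega
      simp only [PySem.List.insertBy, this, Bool.false_eq_true, if_neg, not_false_iff]
      refine List.pairwise_cons.mpr ⟨?_, ih hys⟩
      intro z hz
      rcases (PySem.List.mem_insertBy _ x z ys).mp hz with rfl | hz
      · omega
      · exact hy z hz

-- first match of the insertion, in terms of the first match of the old list
theorem find?_insertBy (p : String → Bool) (f : String → Int) (x : String) (s : List String)
    (h : s.Pairwise (fun a b => f b ≤ f a)) :
    (PySem.List.insertBy (pvBf f) x s).find? p
    = match s.find? p with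
      | some m => if f m < f x then (if p x then some x else some m) else some m
      | none => if p x then some x else none := by
  induction s with
  | nil =>
    by_cases hx : p x = true
    · simp [PySem.List.insertBy, List.find?_cons_of_pos hx, hx]
    · simp [PySem.List.insertBy, List.find?_cons_of_neg hx, hx]
  | cons y ys ih =>
    rcases List.pairwise_cons.mp h with ⟨hy, hys⟩
    by_cases hxy : f y < f x
    · -- x goes in front: x :: y :: ys
      have hbf : pvBf f x y = true := by simp [pvBf, hxy]
      simp only [PySem.List.insertBy, hbf, if_pos]
      have hml : ∀ m, (y :: ys).find? p = some m → f m < f x := by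
        intro m hr
        have hm := List.mem_of_find?_eq_some hr
        rcases List.mem_cons.mp hm with rfl | hm
        · omega
        · have := hy m hm; omega
      by_cases hx : p x = true
      · rw [List.find?_cons_of_pos hx]
        cases hr : (y :: ys).find? p with
        | none => simp [hx]
        | some m => simp [hx, hml m hr]
      · rw [List.find?_cons_of_neg hx]
        cases hr : (y :: ys).find? p with
        | none => simp [hx]
        | some m => simp [hx, hml m hr]
    · -- x goes after y: y :: insertBy x ys
      have hbf : pvBf f x y = false := by simp [pvBf]; omega
      simp only [PySem.List.insertBy, hbf, Bool.false_eq_true, if_neg, not_false_iff]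
      by_cases hyt : p y = true
      · rw [List.find?_cons_of_pos hyt, List.find?_cons_of_pos hyt]
        have : ¬ f y < f x := by omega
        simp [this]
      · rw [List.find?_cons_of_neg hyt,
            List.find?_cons_of_neg hyt]
        exact ih hys

-- loop invariant: A's running-max fold over the remaining keys equals the first
-- match of the incrementally built f-descending insertion list
theorem loop_invariant (p : String → Bool) (f : String → Int)
    (hf : ∀ s, 0 ≤ f s) (hf0 : ∀ s, f s = 0 → s = "") (hfe : f "" = 0)
    (keys : List String) :
    ∀ (s : List String) (st : Int × String),
      s.Pairwise (fun a b => f b ≤ f a) →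
      st.1 = f st.2 →
      st.2 = ((s.find? p).getD "") →
      (keys.foldl
        (fun (st : Int × String) key =>
          if p key then if st.1 < f key then (f key, key) else st else st) st).2
      = ((keys.foldl (fun acc x => PySem.List.insertBy (pvBf f) x acc) s).find? p).getD "" := by
  induction keys with
  | nil => intro s st _ _ h2; simpa using h2
  | cons x rest ih =>
    intro s st hp h1 h2
    simp only [List.foldl_cons]
    refine ih _ _ (pairwise_insertBy f x s hp) ?_ ?_
    · by_cases hx : p x = true
      · simp only [hx, if_pos]
        rw [h1]
        by_cases hlt : f st.2 < f x
        · simp [hlt]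
        · simp [hlt, h1]
      · simp [hx, h1]
    · rw [find?_insertBy p f x s hp]
      cases hr : s.find? p with
      | none =>
        simp only [hr, Option.getD_none] at h2
        by_cases hx : p x = true
        · simp only [hx, if_pos]
          by_cases hlt : st.1 < f x
          · simp [hlt]
          · have hx0 : f x = 0 := by
              have := hf x
              rw [h1, h2, hfe] at hlt
              omega
            rw [hf0 x hx0]
            have hc : ¬ st.1 < f "" := by rw [h1, h2]; omega
            simp [hc, h2]
        · simp [hx, h2]
      | some m =>
        simp only [hr, Option.getD_some] at h2
        by_cases hml : f m < f x
        · by_cases hx : p x = true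
          · have : st.1 < f x := by rw [h1, h2]; exact hml
            simp [hx, hml, this]
          · simp [hx, hml, h2]
        · have hnlt : ¬ st.1 < f x := by rw [h1, h2]; exact hml
          by_cases hx : p x = true <;> simp [hx, hml, hnlt, h2]

-- ===== VERDICT (by name: the statement is the Claim_ definition above) =====
theorem find_obj4_py_spec : Claim_equal_find_obj4_py := by
  intro keys text _
  unfold Spec_find_obj4_py find_obj4_py find_obj4_py_alt
  rw [pvFirstIn_eq_find?, PySem.List.sorted_rev_eq_foldl_insertBy]
  exact loop_invariant (fun k => PySem.Str.isIn k text) PySem.Str.len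
    (fun s => by simp [PySem.Str.len]) len_zero_eq_empty (by simp [PySem.Str.len]) keys
    [] ((0 : Int), "")
    (by simp) (by simp [PySem.Str.len]) (by simp)
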